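-- pv_equiv track=rewrite | github.com/diffwoak/undergraduate_materials | 大三2/大数据/5-Apriori/apriori_old.py | count_prune
-- ===== SOURCE A (Python) =====
-- def count_prune(candidates,transactions,threshold):
-- 	if candidates == []:return []
-- 	nums = [0] * len(candidates)
-- 	for transaction in transactions:
-- 		for i,candidate in enumerate(candidates):
-- 			is_support = True
-- 			for item in candidate:
-- 				if item not in transaction:
-- 					is_support = False
-- 			if is_support:
-- 				nums[i]+=1
-- 	positions = [i for i, num in enumerate(nums) if num > threshold]
-- 	return [candidates[i] for i in positions]
-- ===== SOURCE B (Python) =====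
-- def count_prune(candidates, transactions, threshold):
--     # Inverted index: item -> set of transaction indices containing it.
--     index = {}
--     for j, t in enumerate(transactions):
--         for item in t:
--             index.setdefault(item, set()).add(j)
--     universe = set(range(len(transactions)))
--     result = []
--     for c in candidates:
--         tids = universe
--         for item in c:
--             tids = tids & index.get(item, set())
--         if len(tids) > threshold:
--             result.append(c)
--     return result
-- ===== Notes on version B (the rewrite author's own statement) =====
-- stated objective: faster
-- what changed: B builds an inverted index (item -> set of transaction indices) in one pass and computes each candidate's support as the size of an intersection of tidsets, instead of re-scanning every transaction for every candidate with a per-item linear membership scan.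
import Mathlib
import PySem

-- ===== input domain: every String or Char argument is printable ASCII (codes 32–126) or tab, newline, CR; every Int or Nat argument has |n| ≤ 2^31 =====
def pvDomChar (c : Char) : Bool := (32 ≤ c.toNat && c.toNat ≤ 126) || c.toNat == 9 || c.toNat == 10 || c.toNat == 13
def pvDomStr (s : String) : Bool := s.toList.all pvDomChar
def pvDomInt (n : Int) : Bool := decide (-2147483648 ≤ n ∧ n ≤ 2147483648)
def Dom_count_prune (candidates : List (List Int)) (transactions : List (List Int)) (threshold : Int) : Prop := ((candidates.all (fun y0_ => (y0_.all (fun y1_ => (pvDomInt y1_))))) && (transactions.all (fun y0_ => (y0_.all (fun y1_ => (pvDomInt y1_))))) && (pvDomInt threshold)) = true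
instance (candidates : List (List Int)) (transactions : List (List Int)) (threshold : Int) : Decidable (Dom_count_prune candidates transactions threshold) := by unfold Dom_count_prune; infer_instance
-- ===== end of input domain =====

-- B replaces A's rescan of every transaction per candidate by an inverted index
-- (item -> set of transaction indices) intersected per candidate; objective: alternative algorithm.

-- ===== PORT A =====
-- 'is_support = True; for item in candidate: if item not in transaction: is_support = False'
def pySupp (candidate transaction : List Int) : Bool :=
  candidate.foldl (fun b item => if item ∈ transaction then b else false) true

def count_prune (candidates : List (List Int)) (transactions : List (List Int)) (threshold : Int) : List (List Int) :=
  if candidates = [] then []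
  else
    let nums : List Int := transactions.foldl (fun nums t =>
      (PySem.List.enumerate candidates 0).foldl (fun nums p =>
        if pySupp p.2 t then nums.modify p.1.toNat (· + 1) else nums) nums)
      (List.replicate candidates.length (0 : Int))
    let positions := ((PySem.List.enumerate nums 0).filter (fun p => decide (p.2 > threshold))).map (·.1)
    -- candidates[i]: index always in range here (positions come from enumerate over a list of candidates' length)
    positions.map (fun i => (PySem.List.pyGet? candidates i).getD [])

-- ===== PORT B =====
-- 'for j, t in enumerate(transactions): for item in t: index.setdefault(item, set()).add(j)'
def pvIndex (transactions : List (List Int)) : PySem.Dict Int (PySem.Set Int) :=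
  (PySem.List.enumerate transactions 0).foldl (fun d p =>
    p.2.foldl (fun d item => d.insert item (PySem.Set.add (d.getD item PySem.Set.empty) p.1)) d)
    PySem.Dict.empty

def count_prune_alt (candidates : List (List Int)) (transactions : List (List Int)) (threshold : Int) : List (List Int) :=
  let idx := pvIndex transactions
  let univ : PySem.Set Int := PySem.List.pyRange 0 transactions.length 1
  candidates.foldl (fun acc c =>
    let tids := c.foldl (fun s item => PySem.Set.inter s (idx.getD item PySem.Set.empty)) univ
    if PySem.Set.len tids > threshold then acc ++ [c] else acc) []

-- ===== PRECONDITION & SPEC =====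
def Spec_count_prune (candidates : List (List Int)) (transactions : List (List Int)) (threshold : Int) (out : List (List Int)) : Prop := out = count_prune_alt candidates transactions threshold
instance (candidates : List (List Int)) (transactions : List (List Int)) (threshold : Int) (out : List (List Int)) : Decidable (Spec_count_prune candidates transactions threshold out) := by unfold Spec_count_prune; infer_instance

-- ===== CLAIM (what is proved, stated in full; the proofs are below) =====
def Claim_equal_count_prune : Prop := ∀ (candidates : List (List Int)) (transactions : List (List Int)) (threshold : Int), Dom_count_prune candidates transactions threshold → Spec_count_prune candidates transactions threshold (count_prune candidates transactions threshold)

-- ===== LEMMAS AND PROOFS =====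

-- the support count of candidate c among transactions ts
def pvCnt (c : List Int) (ts : List (List Int)) : Int := (ts.countP (fun t => pySupp c t) : Int)

theorem pvModifyAppend (pre : List Int) (x : Int) (rest : List Int) (f : Int → Int) :
    (pre ++ x :: rest).modify pre.length f = pre ++ f x :: rest := by
  induction pre with
  | nil => simp [List.modify]
  | cons a pre ih =>
    simp only [List.modify, List.modifyTailIdx] at ih ⊢
    simpa [List.modifyTailIdx.go] using ih

theorem pySupp_eq_all (c t : List Int) :
    pySupp c t = c.all (fun item => decide (item ∈ t)) := by
  have h : ∀ (c : List Int) (b : Bool),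
      c.foldl (fun b item => if item ∈ t then b else false) b = (b && c.all (fun item => decide (item ∈ t))) := by
    intro c
    induction c with
    | nil => intro b; simp
    | cons x xs ih =>
      intro b
      rw [List.foldl_cons, ih]
      by_cases hx : x ∈ t <;> simp [hx]
  rw [pySupp, h c true]
  simp

theorem pvZipMap (g : Int → List Int → Int) (f : List Int → Int) (l : List (List Int)) :
    List.zipWith g (l.map f) l = l.map (fun c => g (f c) c) := by
  induction l with
  | nil => simp
  | cons a l ihl => simp only [List.map_cons, List.zipWith_cons_cons, ihl]

-- A-side: one transaction's pass over the candidates updates nums pointwise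
theorem stepA (t : List Int) (cs : List (List Int)) :
    ∀ (pre rest : List Int), rest.length = cs.length →
    (PySem.List.enumerate cs (pre.length : Int)).foldl (fun nums p =>
        if pySupp p.2 t then nums.modify p.1.toNat (· + 1) else nums) (pre ++ rest)
      = pre ++ List.zipWith (fun n c => if pySupp c t then n + 1 else n) rest cs := by
  induction cs with
  | nil =>
    intro pre rest h
    have : rest = [] := List.eq_nil_of_length_eq_zero h
    simp [PySem.List.enumerate_nil, this]
  | cons c cs ih =>
    intro pre rest h
    cases rest with
    | nil => simp at h
    | cons x rest =>
      rw [PySem.List.enumerate_cons, List.foldl_cons]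
      simp only [Int.toNat_natCast]
      have hstate : (if pySupp c t then (pre ++ x :: rest).modify pre.length (· + 1) else pre ++ x :: rest)
          = pre ++ (if pySupp c t then x + 1 else x) :: rest := by
        split_ifs with hs <;> simp [pvModifyAppend]
      rw [hstate]
      have hlen : ((pre ++ [if pySupp c t then x + 1 else x]).length : Int) = (pre.length : Int) + 1 := by
        simp
      have h' : rest.length = cs.length := by simpa using h
      have := ih (pre ++ [if pySupp c t then x + 1 else x]) rest h'
      rw [hlen] at this
      simpa [List.append_assoc] using this

theorem foldA (cs : List (List Int)) (ts : List (List Int)) :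
    ∀ (f : List Int → Int), ts.foldl (fun nums t =>
      (PySem.List.enumerate cs 0).foldl (fun nums p =>
        if pySupp p.2 t then nums.modify p.1.toNat (· + 1) else nums) nums)
      (cs.map f)
    = cs.map (fun c => f c + pvCnt c ts) := by
  induction ts with
  | nil => intro f; simp [pvCnt]
  | cons t ts ih =>
    intro f
    rw [List.foldl_cons]
    have h0 : (PySem.List.enumerate cs (0 : Int)).foldl (fun nums p =>
          if pySupp p.2 t then nums.modify p.1.toNat (· + 1) else nums) (cs.map f)
        = List.zipWith (fun n c => if pySupp c t then n + 1 else n) (cs.map f) cs := by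
      simpa using stepA t cs [] (cs.map f) (by simp)
    rw [h0]
    rw [pvZipMap (fun n c => if pySupp c t then n + 1 else n) f cs]
    have h1 : (fun c => (fun n c => if pySupp c t then n + 1 else n) (f c) c)
        = (fun c => f c + (if pySupp c t then (1 : Int) else 0)) := by
      funext c; by_cases hs : pySupp c t <;> simp [hs]
    rw [h1, ih]
    apply List.map_congr_left
    intro c _
    simp only [pvCnt, List.countP_cons]
    split_ifs with hs <;> push_cast <;> ring

-- A-side: the tail (positions + indexing) is a filter
theorem tailA (th : Int) (g : List Int → Int) (full : List (List Int)) :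
    ∀ (cs : List (List Int)) (k : Nat),
      (∀ j, j < cs.length → PySem.List.pyGet? full ((k + j : Nat) : Int) = some (cs.getD j [])) →
    (((PySem.List.enumerate (cs.map g) (k : Int)).filter (fun p => decide (p.2 > th))).map (·.1)).map
        (fun i => (PySem.List.pyGet? full i).getD [])
      = cs.filter (fun c => decide (g c > th)) := by
  intro cs
  induction cs with
  | nil => intro k h; simp [PySem.List.enumerate_nil]
  | cons c cs ih =>
    intro k h
    have h0 : PySem.List.pyGet? full (k : Int) = some c := by
      have := h 0 (by simp)
      simpa using this
    have h' : ∀ j, j < cs.length → PySem.List.pyGet? full (((k + 1) + j : Nat) : Int) = some (cs.getD j []) := by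
      intro j hj
      have := h (j + 1) (by simpa using Nat.succ_lt_succ hj)
      have harg : (k + (j + 1) : Nat) = ((k + 1) + j : Nat) := by omega
      rw [harg] at this
      simpa using this
    have hstep : ((k : Int) + 1) = (((k + 1 : Nat)) : Int) := by push_cast; ring
    rw [List.map_cons, PySem.List.enumerate_cons, hstep]
    by_cases hc : g c > th
    · simp only [List.filter_cons, hc, if_true, List.map_cons, h0, Option.getD_some, decide_true]
      congr 1
      exact ih (k + 1) h'
    · simp only [List.filter_cons, hc, decide_false]
      exact ih (k + 1) h' 

-- B-side: membership in the inverted index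
theorem idx_inner (j0 : Int) (t : List Int) :
    ∀ (d : PySem.Dict Int (PySem.Set Int)) (item j : Int),
    (j ∈ (t.foldl (fun d item => d.insert item (PySem.Set.add (d.getD item PySem.Set.empty) j0)) d).getD item PySem.Set.empty)
      ↔ j ∈ d.getD item PySem.Set.empty ∨ (j = j0 ∧ item ∈ t) := by
  induction t with
  | nil => intro d item j; simp
  | cons a t iht =>
    intro d item j
    rw [List.foldl_cons, iht, PySem.Dict.getD_insert]
    by_cases hia : item = a <;>
      simp [hia, PySem.Set.mem_add, List.mem_cons]
    tauto

theorem idx_outer (ts : List (List Int)) :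
    ∀ (s0 : Int) (d : PySem.Dict Int (PySem.Set Int)) (item j : Int),
    (j ∈ ((PySem.List.enumerate ts s0).foldl (fun d p =>
        p.2.foldl (fun d item => d.insert item (PySem.Set.add (d.getD item PySem.Set.empty) p.1)) d) d).getD item PySem.Set.empty)
      ↔ j ∈ d.getD item PySem.Set.empty ∨ ∃ k : Nat, k < ts.length ∧ j = s0 + k ∧ item ∈ ts.getD k [] := by
  induction ts with
  | nil => intro s0 d item j; simp [PySem.List.enumerate_nil]
  | cons t ts ih =>
    intro s0 d item j
    rw [PySem.List.enumerate_cons, List.foldl_cons, ih, idx_inner]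
    constructor
    · rintro ((hd | ⟨hj, hm⟩) | ⟨k, hk, hj, hm⟩)
      · exact Or.inl hd
      · exact Or.inr ⟨0, by simp, by simpa using hj, by simpa using hm⟩
      · refine Or.inr ⟨k + 1, by simpa using Nat.succ_lt_succ hk, by push_cast at hj ⊢; omega, by simpa using hm⟩
    · rintro (hd | ⟨k, hk, hj, hm⟩)
      · exact Or.inl (Or.inl hd)
      · cases k with
        | zero => exact Or.inl (Or.inr ⟨by simpa using hj, by simpa using hm⟩)
        | succ k =>
          refine Or.inr ⟨k, by simp at hk; omega, by push_cast at hj ⊢; omega, by simpa using hm⟩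

theorem mem_pvIndex (ts : List (List Int)) (item j : Int) :
    j ∈ (pvIndex ts).getD item PySem.Set.empty ↔ ∃ k : Nat, k < ts.length ∧ j = (k : Int) ∧ item ∈ ts.getD k [] := by
  rw [pvIndex, idx_outer]
  simp [PySem.Dict.getD_empty, PySem.Set.empty]

-- B-side: the intersection loop is a filter
theorem interFold (g : Int → PySem.Set Int) :
    ∀ (c : List Int) (s : PySem.Set Int),
    c.foldl (fun s item => PySem.Set.inter s (g item)) s
      = s.filter (fun j => c.all (fun item => decide (j ∈ g item))) := by
  intro c
  induction c with
  | nil => intro s; simp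
  | cons a c ihc =>
    intro s
    rw [List.foldl_cons, ihc]
    simp only [PySem.Set.inter, List.filter_filter, List.all_cons]
    apply List.filter_congr
    intro x _
    simp [PySem.Set.contains, Bool.and_comm]

theorem countP_range (q : List Int → Bool) :
    ∀ (ts : List (List Int)), (List.range ts.length).countP (fun k => q (ts.getD k [])) = ts.countP q := by
  intro ts
  induction ts with
  | nil => simp
  | cons t ts ih =>
    simp [List.range_succ_eq_map, List.countP_cons, List.countP_map, Function.comp_def] at ih ⊢
    omega

theorem tids_count (ts : List (List Int)) (c : List Int) :
    PySem.Set.len (c.foldl (fun s item => PySem.Set.inter s ((pvIndex ts).getD item PySem.Set.empty))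
        (PySem.List.pyRange 0 ts.length 1))
      = pvCnt c ts := by
  rw [interFold]
  have h1 : pvCnt c ts = ((ts.countP (fun t => c.all (fun item => decide (item ∈ t)))) : Int) := by
    unfold pvCnt
    congr 1
    apply List.countP_congr
    intro t _
    simp [pySupp_eq_all]
  rw [h1, ← countP_range]
  simp only [PySem.Set.len, PySem.List.pyRange_one]
  rw [← List.countP_eq_length_filter, List.countP_map]
  congr 1
  apply List.countP_congr
  intro k hk
  have hkn : k < ts.length := by have := List.mem_range.mp hk; omega
  have hmem : ∀ item : Int, ((k : Int)) ∈ (pvIndex ts).getD item PySem.Set.empty ↔ item ∈ ts.getD k [] := by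
    intro item
    rw [mem_pvIndex]
    constructor
    · rintro ⟨k', hk', hjk, hm⟩
      have : k = k' := by omega
      subst this; exact hm
    · intro hm
      exact ⟨k, hkn, by omega, hm⟩
  constructor
  · intro h
    simp only [Function.comp_apply, zero_add, List.all_eq_true, decide_eq_true_iff] at h ⊢
    intro x hx; exact (hmem x).mp (h x hx)
  · intro h
    simp only [Function.comp_apply, zero_add, List.all_eq_true, decide_eq_true_iff] at h ⊢
    intro x hx; exact (hmem x).mpr (h x hx)

-- ===== VERDICT (by name: the statement is the Claim_ definition above) =====
theorem count_prune_spec : Claim_equal_count_prune := by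
  intro candidates transactions threshold _
  unfold Spec_count_prune
  by_cases hc : candidates = []
  · subst hc; simp [count_prune, count_prune_alt]
  · rw [count_prune, if_neg hc]
    have hrep : List.replicate candidates.length (0 : Int) = candidates.map (fun _ => (0 : Int)) := by
      simp
    simp only [hrep, foldA candidates transactions (fun _ => (0 : Int))]
    have hget : ∀ j, j < candidates.length →
        PySem.List.pyGet? candidates ((0 + j : Nat) : Int) = some (candidates.getD j []) := by
      intro j hj
      simp [List.getD, hj]
    have ht := tailA threshold (fun c => (0 : Int) + pvCnt c transactions) candidates candidates 0 hget
    simp only [Nat.cast_zero] at ht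
    rw [ht]
    rw [count_prune_alt]
    rw [PySem.List.foldl_append_ite_eq_filter]
    rw [List.nil_append]
    apply List.filter_congr
    intro c _
    rw [tids_count]
    simp
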